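-- pv_equiv track=rewrite | github.com/kabir-global-sync/pps2_vit | exer12.py | nameMerge
-- ===== SOURCE A (Python) =====
-- def nameMerge(varScore,varDict):
--     dic={}
--     nm=""
--     for i in varDict:
--         if varScore.count(varDict[i])>1:
--             for j in varDict:
--                 if varDict[j]==varDict[i]:
--                     nm=nm+j+","
--             nm=nm.rstrip(',')
--             dic[nm]=varDict[i]
--             nm=""
--         else:
--             dic[i]=varDict[i]
--     dic=dict(sorted(dic.items(),key=lambda x:x[1],reverse=True))
--     return dic
-- ===== SOURCE B (Python) =====
-- def nameMerge(varScore, varDict):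
--     counts = {}
--     for s in varScore:
--         counts[s] = counts.get(s, 0) + 1
--     groups = {}
--     for name, s in varDict.items():
--         groups.setdefault(s, []).append(name)
--     out = {}
--     for name, s in varDict.items():
--         if counts.get(s, 0) > 1:
--             out[",".join(groups[s]).rstrip(",")] = s
--         else:
--             out[name] = s
--     return dict(sorted(out.items(), key=lambda x: x[1], reverse=True))
-- ===== Notes on version B (the rewrite author's own statement) =====
-- stated objective: faster
-- what changed: B builds a score->count counter and a score->names group index in one pass each, then emits every entry's (possibly merged) key by dictionary lookup, instead of A's per-key varScore.count rescan plus a full inner pass over the whole dict for every key.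
import Mathlib
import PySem

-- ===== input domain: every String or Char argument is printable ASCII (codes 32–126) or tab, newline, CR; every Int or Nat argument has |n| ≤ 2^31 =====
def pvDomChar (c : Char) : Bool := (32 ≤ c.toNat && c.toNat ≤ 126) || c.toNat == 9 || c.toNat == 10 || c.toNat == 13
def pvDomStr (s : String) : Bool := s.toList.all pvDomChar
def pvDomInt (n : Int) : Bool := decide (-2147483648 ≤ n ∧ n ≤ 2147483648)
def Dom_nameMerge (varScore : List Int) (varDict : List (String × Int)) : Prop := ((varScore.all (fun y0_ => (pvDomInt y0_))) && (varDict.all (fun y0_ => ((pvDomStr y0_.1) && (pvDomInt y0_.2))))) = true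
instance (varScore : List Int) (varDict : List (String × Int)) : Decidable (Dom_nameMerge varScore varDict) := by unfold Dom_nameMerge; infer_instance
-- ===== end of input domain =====

-- B replaces A's quadratic rescans (list.count and a full inner pass over the dict for every key) by a
-- score->count counter and a score->names group index, each built in one pass; return values only
-- (neither implementation mutates its arguments).

-- Python str.rstrip(',') ported by hand on code points: drop every trailing ',' (exact; used by both ports)
def rstripComma (cs : List Char) : List Char := (cs.reverse.dropWhile (fun c => c == ',')).reverse

-- ===== PORT A =====
-- inner loop 'for j in varDict: if varDict[j]==varDict[i]: nm=nm+j+","' (strings as code-point lists)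
def nameMergeInner (varDict : List (String × Int)) (vi : Int) : List Char :=
  varDict.foldl (fun nm jv => if jv.2 == vi then nm ++ jv.1.toList ++ [','] else nm) []

def nameMerge (varScore : List Int) (varDict : List (String × Int)) : List (String × Int) :=
  let dic : PySem.Dict String Int := varDict.foldl (fun dic iv =>
    if 1 < PySem.List.count varScore iv.2 then
      dic.insert (String.ofList (rstripComma (nameMergeInner varDict iv.2))) iv.2
    else
      dic.insert iv.1 iv.2) PySem.Dict.empty
  (PySem.Dict.ofList (PySem.List.sorted dic.items (fun x => x.2) true)).items

-- ===== PORT B =====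
def nameMerge_alt (varScore : List Int) (varDict : List (String × Int)) : List (String × Int) :=
  let counts : PySem.Dict Int Int :=
    varScore.foldl (fun d s => d.insert s (d.getD s 0 + 1)) PySem.Dict.empty
  let groups : PySem.Dict Int (List String) :=
    varDict.foldl (fun d p => d.modify p.2 [] (fun l => l ++ [p.1])) PySem.Dict.empty
  let out : PySem.Dict String Int := varDict.foldl (fun out p =>
    if 1 < counts.getD p.2 0 then
      out.insert (String.ofList (rstripComma (PySem.Str.join "," (groups.getD p.2 [])).toList)) p.2
    else
      out.insert p.1 p.2) PySem.Dict.empty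
  (PySem.Dict.ofList (PySem.List.sorted out.items (fun x => x.2) true)).items

-- ===== PRECONDITION & SPEC =====
def Spec_nameMerge (varScore : List Int) (varDict : List (String × Int)) (out : List (String × Int)) : Prop := out = nameMerge_alt varScore varDict
instance (varScore : List Int) (varDict : List (String × Int)) (out : List (String × Int)) : Decidable (Spec_nameMerge varScore varDict out) := by unfold Spec_nameMerge; infer_instance

-- ===== CLAIM (what is proved, stated in full; the proofs are below) =====
def Claim_equal_nameMerge : Prop := ∀ (varScore : List Int) (varDict : List (String × Int)), Dom_nameMerge varScore varDict → Spec_nameMerge varScore varDict (nameMerge varScore varDict)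

-- ===== LEMMAS AND PROOFS =====

-- the dict names carrying score s, in insertion order (proof-only helper)
def pvNamesOf (varDict : List (String × Int)) (s : Int) : List String :=
  (varDict.filter (fun p => p.2 == s)).map Prod.fst

theorem rstripComma_append_comma (xs : List Char) :
    rstripComma (xs ++ [',']) = rstripComma xs := by
  simp [rstripComma]

theorem flatten_comma_eq_join (ls : List (List Char)) (h : ls ≠ []) :
    (ls.map (fun cs => cs ++ [','])).flatten = PySem.Chars.join [','] ls ++ [','] := by
  induction ls with
  | nil => simp at h
  | cons a t ih =>
    cases t with
    | nil => simp [PySem.Chars.join_singleton]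
    | cons b t2 =>
      rw [List.map_cons, List.flatten_cons, ih (by simp), PySem.Chars.join_cons_cons]
      simp [List.append_assoc]

theorem groups_getD (varDict : List (String × Int)) (s : Int) :
    (varDict.foldl (fun d p => d.modify p.2 [] (fun l => l ++ [p.1]))
        (PySem.Dict.empty : PySem.Dict Int (List String))).getD s []
      = pvNamesOf varDict s := by
  have h := PySem.Dict.getD_foldl_modify_append (varDict.map (fun p => (p.2, p.1)))
      (PySem.Dict.empty : PySem.Dict Int (List String)) s
  rw [List.foldl_map] at h
  simpa [pvNamesOf, List.filter_map, Function.comp, List.map_map] using h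

theorem counts_getD (varScore : List Int) (v : Int) :
    (varScore.foldl (fun d s => d.insert s (d.getD s 0 + 1))
        (PySem.Dict.empty : PySem.Dict Int Int)).getD v 0 = (PySem.List.count varScore v : Int) := by
  rw [PySem.Dict.getD_foldl_insert_add_one, PySem.List.count_eq]
  simp [PySem.Dict.getD_empty]

theorem names_ne_nil (varDict : List (String × Int)) (p : String × Int) (hp : p ∈ varDict) :
    pvNamesOf varDict p.2 ≠ [] := by
  have : p.1 ∈ pvNamesOf varDict p.2 := by
    unfold pvNamesOf
    exact List.mem_map_of_mem (List.mem_filter.mpr ⟨hp, by simp⟩)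
  intro h; rw [h] at this; exact absurd this (List.not_mem_nil)

theorem inner_eq (varDict : List (String × Int)) (s : Int) :
    nameMergeInner varDict s
      = ((pvNamesOf varDict s).map (fun n => n.toList ++ [','])).flatten := by
  unfold nameMergeInner
  have h1 : (fun (nm : List Char) (jv : String × Int) =>
        if jv.2 == s then nm ++ jv.1.toList ++ [','] else nm)
      = fun (nm : List Char) (jv : String × Int) =>
        if (fun jv : String × Int => jv.2 == s) jv then nm ++ (jv.1.toList ++ [',']) else nm := by
    funext nm jv; simp [List.append_assoc]
  rw [h1, PySem.List.foldl_if_eq_foldl_filter, PySem.List.foldl_append_eq_flatMap]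
  simp [pvNamesOf, List.flatMap, List.map_map, Function.comp_def]

theorem key_eq (varDict : List (String × Int)) (s : Int)
    (hne : pvNamesOf varDict s ≠ []) :
    String.ofList (rstripComma (nameMergeInner varDict s))
      = String.ofList (rstripComma (PySem.Str.join "," (pvNamesOf varDict s)).toList) := by
  have hsep : ("," : String).toList = [','] := by decide
  have hJ : (PySem.Str.join "," (pvNamesOf varDict s)).toList
      = PySem.Chars.join [','] ((pvNamesOf varDict s).map String.toList) := by
    rw [PySem.Str.toList_join, hsep]
  have hflat : ((pvNamesOf varDict s).map (fun n => n.toList ++ [','])).flatten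
      = PySem.Chars.join [','] ((pvNamesOf varDict s).map String.toList) ++ [','] := by
    have h := flatten_comma_eq_join ((pvNamesOf varDict s).map String.toList) (by simpa using hne)
    rw [List.map_map] at h
    exact h
  rw [inner_eq, hflat, ← hJ, rstripComma_append_comma]

theorem mainEq (varScore : List Int) (varDict : List (String × Int)) :
    nameMerge varScore varDict = nameMerge_alt varScore varDict := by
  have hdic : varDict.foldl (fun dic iv =>
      if 1 < PySem.List.count varScore iv.2 then
        dic.insert (String.ofList (rstripComma (nameMergeInner varDict iv.2))) iv.2
      else
        dic.insert iv.1 iv.2) (PySem.Dict.empty : PySem.Dict String Int)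
    = varDict.foldl (fun out p =>
      if 1 < (varScore.foldl (fun d s => d.insert s (d.getD s 0 + 1))
          (PySem.Dict.empty : PySem.Dict Int Int)).getD p.2 0 then
        out.insert (String.ofList (rstripComma (PySem.Str.join ","
          ((varDict.foldl (fun d p => d.modify p.2 [] (fun l => l ++ [p.1]))
            (PySem.Dict.empty : PySem.Dict Int (List String))).getD p.2 [])).toList)) p.2
      else
        out.insert p.1 p.2) (PySem.Dict.empty : PySem.Dict String Int) := by
    apply PySem.List.foldl_congr_mem
    intro acc p hp
    have hcond : (1 < (varScore.foldl (fun d s => d.insert s (d.getD s 0 + 1))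
        (PySem.Dict.empty : PySem.Dict Int Int)).getD p.2 0) ↔ 1 < PySem.List.count varScore p.2 := by
      rw [counts_getD]; exact_mod_cast Iff.rfl
    by_cases hc : 1 < PySem.List.count varScore p.2
    · rw [if_pos hc, if_pos (hcond.mpr hc), groups_getD,
        key_eq varDict p.2 (names_ne_nil varDict p hp)]
    · rw [if_neg hc, if_neg (fun h => hc (hcond.mp h))]
  show (PySem.Dict.ofList (PySem.List.sorted (varDict.foldl (fun dic iv =>
      if 1 < PySem.List.count varScore iv.2 then
        dic.insert (String.ofList (rstripComma (nameMergeInner varDict iv.2))) iv.2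
      else
        dic.insert iv.1 iv.2) (PySem.Dict.empty : PySem.Dict String Int)).items
        (fun x => x.2) true)).items = _
  rw [hdic]
  rfl

-- ===== VERDICT (by name: the statement is the Claim_ definition above) =====
theorem nameMerge_spec : Claim_equal_nameMerge := by
  intro varScore varDict _
  exact mainEq varScore varDict
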